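-- pv_equiv track=rewrite | github.com/Matteo-Candi/Master-Thesis | benchmark/Python_formatted.py | del_cost
-- ===== SOURCE A (Python) =====
-- def del_cost(s, cost):
--     ans = 0
--     for_max = {}
--     for_tot = {}
--     for i in range(len(s)):
--         if s[i] not in for_max:
--             for_max[s[i]] = cost[i]
--         else:
--             for_max[s[i]] = max(cost[i], for_max[s[i]])
--         if s[i] not in for_tot:
--             for_tot[s[i]] = cost[i]
--         else:
--             for_tot[s[i]] += cost[i]
--     for key, value in for_max.items():
--         ans += for_tot[key] - value
--     return ans
-- ===== SOURCE B (Python) =====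
-- def del_cost(s, cost):
--     ans = 0
--     for c in dict.fromkeys(s):
--         vals = [cost[i] for i in range(len(s)) if s[i] == c]
--         ans += sum(vals) - max(vals)
--     return ans
-- ===== Notes on version B (the rewrite author's own statement) =====
-- stated objective: simpler
-- what changed: B drops A's two incremental dicts entirely: it iterates over the distinct characters of s and, for each, gathers that character's costs in a separate pass and adds sum(vals)-max(vals), i.e. grouped staged passes instead of one-pass hash aggregation.
import Mathlib
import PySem

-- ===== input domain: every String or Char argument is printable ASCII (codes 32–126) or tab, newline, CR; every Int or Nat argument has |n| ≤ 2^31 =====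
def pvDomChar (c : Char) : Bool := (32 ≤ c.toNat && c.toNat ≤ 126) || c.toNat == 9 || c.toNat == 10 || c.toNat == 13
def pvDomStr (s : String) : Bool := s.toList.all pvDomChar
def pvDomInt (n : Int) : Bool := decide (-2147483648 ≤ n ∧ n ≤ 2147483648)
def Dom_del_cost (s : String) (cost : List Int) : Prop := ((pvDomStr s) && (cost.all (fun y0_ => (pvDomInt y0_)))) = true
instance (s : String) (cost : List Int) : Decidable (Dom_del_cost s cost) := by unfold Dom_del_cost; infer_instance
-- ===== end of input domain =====

-- B drops A's two incremental dicts: it loops over the distinct characters and, per character,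
-- gathers that character's costs in a separate pass, adding sum(vals) - max(vals) (objective: simpler).

-- ===== PORT A =====
-- one iteration of A's loop, on the pair (for_max, for_tot)
def delCostStepA (cs : List Char) (cost : List Int)
    (st : PySem.Dict Char Int × PySem.Dict Char Int) (i : Int) :
    PySem.Dict Char Int × PySem.Dict Char Int :=
  let c := PySem.List.pyGetD cs i ' '
  let ci := PySem.List.pyGetD cost i 0
  let fm := if st.1.contains c = false then st.1.insert c ci
            else st.1.insert c (max ci (st.1.getD c 0))
  let ft := if st.2.contains c = false then st.2.insert c ci
            else st.2.insert c (st.2.getD c 0 + ci)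
  (fm, ft)

def del_cost (s : String) (cost : List Int) : Int :=
  let cs := s.toList
  let st := (PySem.List.pyRange 0 (PySem.Str.len s) 1).foldl (delCostStepA cs cost)
              (PySem.Dict.empty, PySem.Dict.empty)
  st.1.items.foldl (fun ans kv => ans + (st.2.getD kv.1 0 - kv.2)) 0

-- ===== PORT B =====
-- for c in dict.fromkeys(s): vals = [cost[i] for i in range(len(s)) if s[i] == c]; ans += sum(vals) - max(vals)
-- Python's max(vals) raises on an empty list; here vals is never empty (c occurs in s), so '.getD 0' is unreachable.
def del_cost_alt (s : String) (cost : List Int) : Int :=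
  let cs := s.toList
  (PySem.List.dedup cs).foldl (fun ans c =>
    let vals := ((PySem.List.pyRange 0 (PySem.Str.len s) 1).filter
        (fun i => PySem.List.pyGetD cs i ' ' == c)).map (fun i => PySem.List.pyGetD cost i 0)
    ans + (vals.sum - (PySem.List.max? vals (fun x => x)).getD 0)) 0

-- ===== PRECONDITION & SPEC =====
-- Pre_ excludes exactly the inputs where Python A raises IndexError: cost shorter than s.
def Pre_del_cost (s : String) (cost : List Int) : Prop := s.toList.length ≤ cost.length
instance (s : String) (cost : List Int) : Decidable (Pre_del_cost s cost) := by unfold Pre_del_cost; infer_instance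
def pvWitness_del_cost : String × List Int := ("aba", [2, 5, 1])

def Spec_del_cost (s : String) (cost : List Int) (out : Int) : Prop := out = del_cost_alt s cost
instance (s : String) (cost : List Int) (out : Int) : Decidable (Spec_del_cost s cost out) := by unfold Spec_del_cost; infer_instance

-- ===== CLAIM (what is proved, stated in full; the proofs are below) =====
def Claim_equal_del_cost : Prop := ∀ (s : String) (cost : List Int), Dom_del_cost s cost → Pre_del_cost s cost → Spec_del_cost s cost (del_cost s cost)

-- ===== LEMMAS AND PROOFS =====

-- pair-level version of A's loop body (the index already resolved to (char, cost))
def stepA2 (st : PySem.Dict Char Int × PySem.Dict Char Int) (p : Char × Int) :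
    PySem.Dict Char Int × PySem.Dict Char Int :=
  let fm := if st.1.contains p.1 = false then st.1.insert p.1 p.2
            else st.1.insert p.1 (max p.2 (st.1.getD p.1 0))
  let ft := if st.2.contains p.1 = false then st.2.insert p.1 p.2
            else st.2.insert p.1 (st.2.getD p.1 0 + p.2)
  (fm, ft)

-- the costs of character c among the processed (char, cost) pairs
def gvals (l : List (Char × Int)) (c : Char) : List Int :=
  (l.filter (fun p => p.1 == c)).map Prod.snd

-- running max / sum of a group, as an Option (none = group empty)
def gmax? : List Int → Option Int
  | [] => none
  | v :: t => some (t.foldl max v)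

def gsum? (vs : List Int) : Option Int := if vs = [] then none else some vs.sum

lemma gvals_append (l : List (Char × Int)) (p : Char × Int) (c : Char) :
    gvals (l ++ [p]) c = gvals l c ++ (if p.1 == c then [p.2] else []) := by
  by_cases h : p.1 = c <;> simp [gvals, List.filter_append, h]

lemma gmax?_append (vs : List Int) (x : Int) :
    gmax? (vs ++ [x]) = some ((gmax? vs).elim x (fun m => max m x)) := by
  cases vs <;> simp [gmax?, List.foldl_append]

lemma gsum?_append (vs : List Int) (x : Int) :
    gsum? (vs ++ [x]) = some ((gsum? vs).getD 0 + x) := by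
  cases vs with
  | nil => simp [gsum?]
  | cons a t => simp [gsum?]; ring

lemma gvals_ne_nil_iff (l : List (Char × Int)) (c : Char) :
    gvals l c ≠ [] ↔ c ∈ l.map Prod.fst := by
  simp only [gvals, ne_eq, List.map_eq_nil_iff, List.filter_eq_nil_iff, List.mem_map]
  constructor
  · intro h
    by_contra hn
    exact h (fun p hp hpc => hn ⟨p, hp, by simpa using hpc⟩)
  · rintro ⟨p, hp, hc⟩ h
    exact h p hp (by simp [hc])

lemma dedup_append_singleton (xs : List Char) (a : Char) :
    PySem.List.dedup (xs ++ [a])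
      = if a ∈ xs then PySem.List.dedup xs else PySem.List.dedup xs ++ [a] := by
  simp only [PySem.List.dedup_eq_ofList, PySem.Set.ofList_eq_foldl, List.foldl_append,
    List.foldl_cons, List.foldl_nil]
  rw [← PySem.Set.ofList_eq_foldl]
  show PySem.Set.add (PySem.Set.ofList xs) a = _
  unfold PySem.Set.add
  by_cases h : a ∈ xs
  · rw [if_pos ((PySem.Set.contains_iff _ _).2 (by simpa using h)), if_pos h]
  · rw [if_neg (fun hc => h (by simpa using (PySem.Set.contains_iff _ _).1 hc)), if_neg h]

-- the loop invariant relating A's state after processing pre to the groups of pre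
def InvA (pre : List (Char × Int)) (st : PySem.Dict Char Int × PySem.Dict Char Int) : Prop :=
  st.1.keys = PySem.List.dedup (pre.map Prod.fst) ∧
  st.1.keys.Nodup ∧
  (∀ c, st.1.get? c = gmax? (gvals pre c)) ∧
  st.2.keys = st.1.keys ∧
  (∀ c, st.2.get? c = gsum? (gvals pre c))

lemma invA_step (pre : List (Char × Int)) (st : PySem.Dict Char Int × PySem.Dict Char Int)
    (p : Char × Int) (h : InvA pre st) : InvA (pre ++ [p]) (stepA2 st p) := by
  obtain ⟨hk, hnd, hm, hk2, hs⟩ := h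
  have hcc : st.2.contains p.1 = st.1.contains p.1 := by
    rw [PySem.Dict.contains_eq_isSome_get?, PySem.Dict.contains_eq_isSome_get?, hm, hs]
    cases hgv : gvals pre p.1 <;> simp [gmax?, gsum?]
  have hmap : (pre ++ [p]).map Prod.fst = pre.map Prod.fst ++ [p.1] := by simp
  have hgv_eq : gvals (pre ++ [p]) p.1 = gvals pre p.1 ++ [p.2] := by
    rw [gvals_append]; simp
  have hgv_ne : ∀ c, c ≠ p.1 → gvals (pre ++ [p]) c = gvals pre c := by
    intro c hcp
    rw [gvals_append]
    simp [Ne.symm hcp]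
  by_cases hc : st.1.contains p.1 = true
  · -- p.1 already a key: its group is nonempty
    have hne : gvals pre p.1 ≠ [] := by
      intro hnil
      rw [PySem.Dict.contains_eq_isSome_get?, hm, hnil] at hc
      simp [gmax?] at hc
    obtain ⟨v, t, hvt⟩ : ∃ v t, gvals pre p.1 = v :: t := by
      cases hgv : gvals pre p.1 with
      | nil => exact absurd hgv hne
      | cons v t => exact ⟨v, t, rfl⟩
    have hmem : p.1 ∈ pre.map Prod.fst := (gvals_ne_nil_iff _ _).1 hne
    have hg1 : st.1.getD p.1 0 = t.foldl max v := by
      rw [PySem.Dict.getD_eq_get?_getD, hm, hvt]; rfl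
    have hg2 : st.2.getD p.1 0 = (v :: t).sum := by
      rw [PySem.Dict.getD_eq_get?_getD, hs, hvt]; simp [gsum?]
    have hc2 : st.2.contains p.1 = true := by rw [hcc]; exact hc
    have e1 : (stepA2 st p).1 = st.1.insert p.1 (max p.2 (t.foldl max v)) := by
      simp [stepA2, hc, hg1]
    have e2 : (stepA2 st p).2 = st.2.insert p.1 ((v :: t).sum + p.2) := by
      simp [stepA2, hc2, hg2]
    refine ⟨?_, ?_, ?_, ?_, ?_⟩
    · rw [e1, PySem.Dict.keys_insert_of_contains _ _ hc, hk, hmap,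
        dedup_append_singleton, if_pos hmem]
    · rw [e1, PySem.Dict.keys_insert_of_contains _ _ hc]; exact hnd
    · intro c
      by_cases hcp : c = p.1
      · subst hcp
        rw [e1, PySem.Dict.get?_insert, if_pos rfl, hgv_eq, gmax?_append, hvt]
        simp [gmax?, max_comm]
      · rw [e1, PySem.Dict.get?_insert, if_neg hcp, hm c, hgv_ne c hcp]
    · rw [e1, e2, PySem.Dict.keys_insert_of_contains _ _ hc,
        PySem.Dict.keys_insert_of_contains _ _ hc2, hk2]
    · intro c
      by_cases hcp : c = p.1
      · subst hcp
        rw [e2, PySem.Dict.get?_insert, if_pos rfl, hgv_eq, gsum?_append, hvt]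
        simp [gsum?]
      · rw [e2, PySem.Dict.get?_insert, if_neg hcp, hs c, hgv_ne c hcp]
  · -- p.1 is fresh: its group is empty
    have hcf : st.1.contains p.1 = false := by simpa using hc
    have hnil : gvals pre p.1 = [] := by
      by_contra hne
      rw [PySem.Dict.contains_eq_isSome_get?, hm] at hcf
      cases hgv : gvals pre p.1 with
      | nil => exact hne hgv
      | cons v t => rw [hgv] at hcf; simp [gmax?] at hcf
    have hnmem : p.1 ∉ pre.map Prod.fst := by
      intro hmem; exact ((gvals_ne_nil_iff pre p.1).2 hmem) hnil
    have hc2 : st.2.contains p.1 = false := by rw [hcc]; exact hcf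
    have e1 : (stepA2 st p).1 = st.1.insert p.1 p.2 := by simp [stepA2, hcf]
    have e2 : (stepA2 st p).2 = st.2.insert p.1 p.2 := by simp [stepA2, hc2]
    refine ⟨?_, ?_, ?_, ?_, ?_⟩
    · rw [e1, PySem.Dict.keys_insert_of_not_contains _ _ hcf, hk, hmap,
        dedup_append_singleton, if_neg hnmem]
    · rw [e1]; exact PySem.Dict.nodup_keys_insert _ _ _ hnd
    · intro c
      by_cases hcp : c = p.1
      · subst hcp
        rw [e1, PySem.Dict.get?_insert, if_pos rfl, hgv_eq, gmax?_append, hnil]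
        simp [gmax?]
      · rw [e1, PySem.Dict.get?_insert, if_neg hcp, hm c, hgv_ne c hcp]
    · rw [e1, e2, PySem.Dict.keys_insert_of_not_contains _ _ hcf,
        PySem.Dict.keys_insert_of_not_contains _ _ hc2, hk2]
    · intro c
      by_cases hcp : c = p.1
      · subst hcp
        rw [e2, PySem.Dict.get?_insert, if_pos rfl, hgv_eq, gsum?_append, hnil]
        simp [gsum?]
      · rw [e2, PySem.Dict.get?_insert, if_neg hcp, hs c, hgv_ne c hcp]

lemma invA_foldl (l : List (Char × Int)) :
    ∀ (pre : List (Char × Int)) (st : PySem.Dict Char Int × PySem.Dict Char Int),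
      InvA pre st → InvA (pre ++ l) (l.foldl stepA2 st) := by
  induction l with
  | nil => intro pre st h; simpa using h
  | cons p t ih =>
    intro pre st h
    have := ih (pre ++ [p]) (stepA2 st p) (invA_step pre st p h)
    simpa using this

lemma invA_empty : InvA [] (PySem.Dict.empty, PySem.Dict.empty) := by
  refine ⟨?_, ?_, ?_, ?_, ?_⟩ <;>
    simp [PySem.Dict.empty, PySem.Dict.keys, PySem.Dict.get?, gvals, gmax?, gsum?,
      PySem.List.dedup]

-- range-indexed fold = fold over the zipped (char, cost) list
lemma foldA_range_eq_zip (cs : List Char) (cost : List Int) (n : Nat)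
    (hn : n ≤ cs.length) (hc : n ≤ cost.length) (init : PySem.Dict Char Int × PySem.Dict Char Int) :
    (PySem.List.pyRange 0 (n : Int) 1).foldl (delCostStepA cs cost) init
      = ((cs.zip cost).take n).foldl stepA2 init := by
  induction n with
  | zero => simp
  | succ m ihm =>
    have hm : m ≤ cs.length := Nat.le_of_succ_le hn
    have hmc : m ≤ cost.length := Nat.le_of_succ_le hc
    have hms : m < cs.length := hn
    have hmsc : m < cost.length := hc
    have hcast : ((m : Int) + 1) = ((m + 1 : Nat) : Int) := by push_cast; ring
    rw [← hcast, PySem.List.pyRange_one_succ_right (by positivity), List.foldl_append,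
        ihm hm hmc, List.take_add_one]
    have hz : (cs.zip cost)[m]? = some (cs[m], cost[m]) := by
      rw [List.getElem?_eq_getElem (by simp [List.length_zip]; omega)]
      simp
    rw [hz, List.foldl_append]
    simp only [Option.toList_some, List.foldl_cons, List.foldl_nil]
    simp [delCostStepA, stepA2, PySem.List.pyGetD_natCast,
          List.getD_eq_getElem?_getD, List.getElem?_eq_getElem hms, List.getElem?_eq_getElem hmsc]

-- B's per-character comprehension over range(len(s)) equals the group of the zipped list
lemma valsB_eq_gvals (cs : List Char) (cost : List Int) (c : Char) (n : Nat)
    (hn : n ≤ cs.length) (hc : n ≤ cost.length) :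
    (((PySem.List.pyRange 0 (n : Int) 1).filter
        (fun i => PySem.List.pyGetD cs i ' ' == c)).map (fun i => PySem.List.pyGetD cost i 0))
      = gvals ((cs.zip cost).take n) c := by
  induction n with
  | zero => simp [gvals]
  | succ m ihm =>
    have hm : m ≤ cs.length := Nat.le_of_succ_le hn
    have hmc : m ≤ cost.length := Nat.le_of_succ_le hc
    have hms : m < cs.length := hn
    have hmsc : m < cost.length := hc
    have hcast : ((m : Int) + 1) = ((m + 1 : Nat) : Int) := by push_cast; ring
    rw [← hcast, PySem.List.pyRange_one_succ_right (by positivity), List.filter_append,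
        List.map_append, ihm hm hmc, List.take_add_one]
    have hz : (cs.zip cost)[m]? = some (cs[m], cost[m]) := by
      rw [List.getElem?_eq_getElem (by simp [List.length_zip]; omega)]
      simp
    rw [hz]
    simp only [Option.toList_some]
    rw [gvals_append]
    congr 1
    have hgc : PySem.List.pyGetD cs (m : Int) ' ' = cs[m] := by
      simp [PySem.List.pyGetD_natCast, List.getD_eq_getElem?_getD, List.getElem?_eq_getElem hms]
    have hgi : PySem.List.pyGetD cost (m : Int) 0 = cost[m] := by
      simp [PySem.List.pyGetD_natCast, List.getD_eq_getElem?_getD, List.getElem?_eq_getElem hmsc]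
    by_cases h : cs[m] = c
    · simp [hgc, hgi, h]
    · simp [hgc, h]

-- ===== VERDICT (by name: the statement is the Claim_ definition above) =====
theorem del_cost_spec : Claim_equal_del_cost := by
  unfold Claim_equal_del_cost
  intro s cost _ hpre
  unfold Spec_del_cost
  simp only [del_cost, del_cost_alt, PySem.Str.len_eq]
  set cs := s.toList with hcs
  have hlen : cs.length ≤ cost.length := hpre
  set l := cs.zip cost with hl
  have htake : (cs.zip cost).take cs.length = l := by
    rw [hl]
    exact List.take_of_length_le (by simp [List.length_zip])
  rw [foldA_range_eq_zip cs cost cs.length le_rfl hlen _, htake]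
  obtain ⟨hk, hnd, hm, hk2, hs⟩ :=
    (by simpa using invA_foldl l [] (PySem.Dict.empty, PySem.Dict.empty) invA_empty :
      InvA l (l.foldl stepA2 (PySem.Dict.empty, PySem.Dict.empty)))
  set st := l.foldl stepA2 (PySem.Dict.empty, PySem.Dict.empty) with hst
  have hmapfst : l.map Prod.fst = cs := List.map_fst_zip hlen
  -- A's final pass, as a sum over the keys
  rw [PySem.List.foldl_add st.1.items (fun kv => st.2.getD kv.1 0 - kv.2) 0, zero_add]
  rw [PySem.Dict.items_eq_map_keys st.1 hnd 0, List.map_map]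
  -- B's loop, as a sum over the distinct characters
  rw [PySem.List.foldl_add (PySem.List.dedup cs)
    (fun c => (((PySem.List.pyRange 0 (cs.length : Int) 1).filter
        (fun i => PySem.List.pyGetD cs i ' ' == c)).map (fun i => PySem.List.pyGetD cost i 0)).sum
      - (PySem.List.max? (((PySem.List.pyRange 0 (cs.length : Int) 1).filter
        (fun i => PySem.List.pyGetD cs i ' ' == c)).map (fun i => PySem.List.pyGetD cost i 0))
        (fun x => x)).getD 0) 0, zero_add]
  rw [hk, hmapfst]
  congr 1
  apply List.map_congr_left
  intro c hcmem
  have hcs' : c ∈ cs := (PySem.List.mem_dedup cs c).1 hcmem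
  have hne : gvals l c ≠ [] := (gvals_ne_nil_iff l c).2 (by rw [hmapfst]; exact hcs')
  obtain ⟨v, t, hvt⟩ : ∃ v t, gvals l c = v :: t := by
    cases hgv : gvals l c with
    | nil => exact absurd hgv hne
    | cons v t => exact ⟨v, t, rfl⟩
  have hvals : (((PySem.List.pyRange 0 (cs.length : Int) 1).filter
      (fun i => PySem.List.pyGetD cs i ' ' == c)).map (fun i => PySem.List.pyGetD cost i 0))
      = gvals l c := by
    rw [valsB_eq_gvals cs cost c cs.length le_rfl hlen, htake]
  have hgd2 : st.2.getD c 0 = (gvals l c).sum := by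
    rw [PySem.Dict.getD_eq_get?_getD, hs c, hvt]; simp [gsum?]
  have hgd1 : st.1.getD c 0 = t.foldl max v := by
    rw [PySem.Dict.getD_eq_get?_getD, hm c, hvt]; rfl
  simp only [Function.comp, hvals, hgd2, hgd1, hvt]
  rw [PySem.List.max?_id_cons]
  rfl
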